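-- pv_equiv track=rewrite | github.com/meswapnilspal/Advanced-DSA | 3. Queue/Perfect Numbers.py | solve
-- ===== SOURCE A (Python) =====
-- from queue import Queue
--
-- def solve(A):
--     pn = Queue()
--     pn.put("1")
--     pn.put("2")
--
--     c = 0
--     while(c<A):
--         front = pn.get()
--         c +=1
--         if c == A:
--             return (front + front[::-1])
--         v1 = front + "1"
--         v2 = front + "2"
--         # v1 = v1 + v1[::-1]
--         # v2 = v2 + v2[::-1]
--         pn.put(v1)
--         pn.put(v2)
-- ===== SOURCE B (Python) =====
-- def solve(A):
--     # Node A in BFS order corresponds to n = A+1 in heap numbering: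
--     # the digits are the binary bits of n below the leading 1, 0->'1', 1->'2'.
--     n = A + 1
--     s = ""
--     while n > 1:
--         s = ("2" if n % 2 == 1 else "1") + s
--         n //= 2
--     return s + s[::-1]
-- ===== Notes on version B (the rewrite author's own statement) =====
-- stated objective: faster
-- what changed: Replaces the BFS queue simulation (A dequeues/enqueues A nodes to find the A-th {1,2}-string) with a direct closed-form construction: the digits are the binary bits of A+1 below its leading 1 (0->'1', 1->'2'), built by repeated halving.
-- outside the precondition, e.g. on solve(0): A returns None, B returns ''; on solve(-3): A returns None, B returns ''
import Mathlib
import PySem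

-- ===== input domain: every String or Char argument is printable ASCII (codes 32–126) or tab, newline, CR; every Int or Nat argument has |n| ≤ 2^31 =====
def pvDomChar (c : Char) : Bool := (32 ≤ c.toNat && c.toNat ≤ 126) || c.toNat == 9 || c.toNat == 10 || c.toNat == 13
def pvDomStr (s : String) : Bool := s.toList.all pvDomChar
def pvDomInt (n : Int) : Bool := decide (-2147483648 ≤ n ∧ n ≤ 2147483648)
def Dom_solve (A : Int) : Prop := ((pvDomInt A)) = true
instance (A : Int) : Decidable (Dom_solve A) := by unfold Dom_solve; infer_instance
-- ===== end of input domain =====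

-- B replaces A's O(A) BFS-queue simulation by the O(log A) closed-form binary encoding of A+1
-- (objective: faster, asymptotic). Equivalence is claimed on Pre_solve (1 ≤ A); for A ≤ 0 the
-- Python A falls off its loop and returns None (not a str), so those inputs are excluded.

-- ===== PORT A =====
-- s[::-1]: step -1 never raises, so .getD "" is exact (PySem.Str.slice?_none_none_neg_one)
def pyRev (s : String) : String := (PySem.Str.slice? s none none (-1)).getD ""

-- the while loop of A; the queue is the list, 'get' takes the head, 'put' appends.
-- The [] branch is unreachable (the queue grows each iteration); the final 'else' is the loop
-- running out (c ≥ A at entry), where Python returns None — excluded by Pre_solve.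
def solveLoop (A c : Int) (q : List String) : String :=
  if c < A then
    match q with
    | [] => ""
    | front :: rest =>
      if c + 1 = A then front ++ pyRev front
      else solveLoop A (c + 1) (rest ++ [front ++ "1", front ++ "2"])
  else ""
termination_by (A - c).toNat
decreasing_by omega

def solve (A : Int) : String := solveLoop A 0 ["1", "2"]

-- ===== PORT B =====
-- the while loop of B: peel bits of n from the bottom, prepending the digit
def altLoop (n : Int) (s : String) : String :=
  if n > 1 then
    altLoop (PySem.Int.floordiv n 2)
      ((if PySem.Int.mod n 2 = 1 then "2" else "1") ++ s)
  else s
termination_by n.toNat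
decreasing_by
  rename_i h
  rw [PySem.Int.floordiv_eq_ediv_of_pos (by omega)]
  omega

def solve_alt (A : Int) : String :=
  let n := A + 1
  let s := altLoop n ""
  s ++ pyRev s

-- ===== PRECONDITION & SPEC =====
-- Pre_solve excludes A ≤ 0: there the Python A falls off its while loop and returns None,
-- which is not a value of the declared string type (B returns "" there).
def Pre_solve (A : Int) : Prop := 1 ≤ A
instance (A : Int) : Decidable (Pre_solve A) := by unfold Pre_solve; infer_instance
def pvWitness_solve : Int := (1)

def Spec_solve (A : Int) (out : String) : Prop := out = solve_alt A
instance (A : Int) (out : String) : Decidable (Spec_solve A out) := by unfold Spec_solve; infer_instance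

-- ===== CLAIM (what is proved, stated in full; the proofs are below) =====
def Claim_equal_solve : Prop := ∀ (A : Int), Dom_solve A → Pre_solve A → Spec_solve A (solve A)

-- ===== LEMMAS AND PROOFS =====

-- the string B assigns to heap node n (n ≥ 2); node A of the BFS is node A+1 here
def g (n : Int) : String := altLoop n ""

lemma altLoop_gt (n : Int) (s : String) (h : n > 1) :
    altLoop n s = altLoop (PySem.Int.floordiv n 2)
      ((if PySem.Int.mod n 2 = 1 then "2" else "1") ++ s) := by
  conv_lhs => rw [altLoop]
  rw [if_pos h]

lemma altLoop_le (n : Int) (s : String) (h : ¬ n > 1) : altLoop n s = s := by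
  conv_lhs => rw [altLoop]
  rw [if_neg h]

lemma altLoop_acc : ∀ (m : Nat) (n : Int), n.toNat ≤ m → ∀ s, altLoop n s = altLoop n "" ++ s := by
  intro m
  induction m with
  | zero =>
    intro n hn s
    rw [altLoop_le n s (by omega), altLoop_le n "" (by omega)]
    exact String.empty_append.symm
  | succ m ih =>
    intro n hn s
    by_cases h : n > 1
    · rw [altLoop_gt n s h, altLoop_gt n "" h]
      have hd : (PySem.Int.floordiv n 2).toNat ≤ m := by
        rw [PySem.Int.floordiv_eq_ediv_of_pos (by omega)]; omega
      rw [ih _ hd, ih _ hd ((if PySem.Int.mod n 2 = 1 then "2" else "1") ++ "")]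
      simp [String.append_assoc]
    · rw [altLoop_le n s h, altLoop_le n "" h]
      exact String.empty_append.symm

lemma g_even (m : Int) (hm : 1 ≤ m) : g (2 * m) = g m ++ "1" := by
  unfold g
  rw [altLoop_gt _ _ (by omega)]
  have h2 : PySem.Int.mod (2 * m) 2 = 0 := by
    rw [PySem.Int.mod_eq_emod_of_pos (by omega)]; omega
  have hd : PySem.Int.floordiv (2 * m) 2 = m := by
    rw [PySem.Int.floordiv_eq_ediv_of_pos (by omega)]; omega
  rw [h2] at *
  simp only [hd]
  rw [if_neg (by omega)]
  rw [altLoop_acc m.toNat m (le_refl _)]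
  simp

lemma g_odd (m : Int) (hm : 1 ≤ m) : g (2 * m + 1) = g m ++ "2" := by
  unfold g
  rw [altLoop_gt _ _ (by omega)]
  have h2 : PySem.Int.mod (2 * m + 1) 2 = 1 := by
    rw [PySem.Int.mod_eq_emod_of_pos (by omega)]; omega
  have hd : PySem.Int.floordiv (2 * m + 1) 2 = m := by
    rw [PySem.Int.floordiv_eq_ediv_of_pos (by omega)]; omega
  rw [h2, hd, if_pos rfl]
  rw [altLoop_acc m.toNat m (le_refl _)]
  simp

-- the queue after c dequeues holds nodes c+2 .. 2c+3
lemma loop_eq : ∀ (fuel : Nat) (A : Int) (k : Nat), (k : Int) < A → A ≤ (k : Int) + fuel →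
    solveLoop A (k : Int) ((List.range' (k + 2) (k + 2)).map (fun (i : Nat) => g (i : Int)))
      = g (A + 1) ++ pyRev (g (A + 1)) := by
  intro fuel
  induction fuel with
  | zero => intro A k hk hA; omega
  | succ fuel ih =>
    intro A k hk hA
    rw [List.range'_succ, List.map_cons, solveLoop.eq_def, if_pos hk]
    dsimp only
    by_cases hEnd : (k : Int) + 1 = A
    · rw [if_pos hEnd]
      push_cast
      rw [show ((k : Int) + 2) = A + 1 by omega]
    · rw [if_neg hEnd]
      simp only [show k + 2 + 1 = k + 3 from rfl]
      push_cast
      have hq : (List.range' (k + 3) (k + 1)).map (fun (i : Nat) => g (i : Int))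
          ++ [g ((k : Int) + 2) ++ "1", g ((k : Int) + 2) ++ "2"]
          = (List.range' ((k + 1) + 2) ((k + 1) + 2)).map (fun (i : Nat) => g (i : Int)) := by
        have h1 : List.range' (k + 3) (k + 3) = List.range' (k + 3) (k + 2) ++ [2 * k + 5] := by
          rw [List.range'_concat]; congr 2; omega
        have h2 : List.range' (k + 3) (k + 2) = List.range' (k + 3) (k + 1) ++ [2 * k + 4] := by
          rw [List.range'_concat]; congr 2; omega
        have e1 : g ((2 * k + 4 : Nat) : Int) = g ((k : Int) + 2) ++ "1" := by
          have := g_even ((k : Int) + 2) (by omega)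
          push_cast
          rw [show (2 * (k : Int) + 4) = 2 * ((k : Int) + 2) by ring]
          exact this
        have e2 : g ((2 * k + 5 : Nat) : Int) = g ((k : Int) + 2) ++ "2" := by
          have := g_odd ((k : Int) + 2) (by omega)
          push_cast
          rw [show (2 * (k : Int) + 5) = 2 * ((k : Int) + 2) + 1 by ring]
          exact this
        simp only [show (k + 1) + 2 = k + 3 from rfl]
        rw [h1, h2, List.map_append, List.map_append, List.map_singleton, List.map_singleton,
          e1, e2, List.append_assoc]
        rfl
      rw [hq]
      have hA' : A ≤ (k : Int) + fuel + 1 := by push_cast at hA; omega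
      have := ih A (k + 1) (by push_cast; omega) (by push_cast; omega)
      push_cast at this ⊢
      exact this

lemma g_two : g 2 = "1" := by
  unfold g
  rw [altLoop_gt _ _ (by norm_num)]
  have h2 : PySem.Int.mod 2 2 = 0 := by
    rw [PySem.Int.mod_eq_emod_of_pos (by omega)]; decide
  have hd : PySem.Int.floordiv 2 2 = 1 := by
    rw [PySem.Int.floordiv_eq_ediv_of_pos (by omega)]; decide
  rw [h2, hd, if_neg (by omega), altLoop_le _ _ (by omega)]
  simp

lemma g_three : g 3 = "2" := by
  unfold g
  rw [altLoop_gt _ _ (by norm_num)]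
  have h2 : PySem.Int.mod 3 2 = 1 := by
    rw [PySem.Int.mod_eq_emod_of_pos (by omega)]; decide
  have hd : PySem.Int.floordiv 3 2 = 1 := by
    rw [PySem.Int.floordiv_eq_ediv_of_pos (by omega)]; decide
  rw [h2, hd, if_pos rfl, altLoop_le _ _ (by omega)]
  simp

-- ===== VERDICT (by name: the statement is the Claim_ definition above) =====
theorem solve_spec : Claim_equal_solve := by
  intro A _ hPre
  unfold Spec_solve solve solve_alt
  have hq : (["1", "2"] : List String) = (List.range' 2 2).map (fun (i : Nat) => g (i : Int)) := by
    simp [List.range'_succ, g_two, g_three]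
  have := loop_eq A.toNat A 0 (by exact_mod_cast hPre) (by push_cast; omega)
  simp only [Nat.cast_zero] at this hq
  rw [hq]
  simpa [g] using this
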